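-- pv_equiv track=rewrite | github.com/mattdonati/Not-So-Slippery-Slope | src/grid.py | _adjust_dimension
-- ===== SOURCE A (Python) =====
-- def _adjust_dimension(initial_start, initial_end, poly_size):
--     '''
--     Adjust the starting and ending x or y positions so that the width or height is divisible by poly_size. Keep
--     Grid roughly centered over desired coverage area
--     :param initial_start: Int. zero-referenced starting position prior to adjustment
--     :param initial_end: Int. zero-referenced ending position prior to adjustment
--     :param poly_size: Int. size of Grid polygons in units of number of SNODAS polygons
--     :return: new_start, new_end
--     '''
--     new_start = initial_start
--     new_end = initial_end
--     initial_size = initial_end - initial_start + 1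
--     new_size = initial_end - initial_start + 1
--     while new_size % poly_size != 0:
--         new_size += 1
--     add_size = new_size - initial_size
--
--     new_start -= (add_size // 2)
--     new_end += (add_size // 2 + add_size % 2)
--     return new_start, new_end
-- ===== SOURCE B (Python) =====
-- def _adjust_dimension(initial_start, initial_end, poly_size):
--     add_size = (initial_start - initial_end - 1) % abs(poly_size)
--     half = add_size // 2
--     return initial_start - half, initial_end + add_size - half
-- ===== Notes on version B (the rewrite author's own statement) =====
-- stated objective: simpler
-- what changed: Replaces the increment-until-divisible while loop with a single closed-form modular expression add_size = (initial_start - initial_end - 1) % abs(poly_size) and folds the ceiling half into add_size - add_size//2.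
import Mathlib
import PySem

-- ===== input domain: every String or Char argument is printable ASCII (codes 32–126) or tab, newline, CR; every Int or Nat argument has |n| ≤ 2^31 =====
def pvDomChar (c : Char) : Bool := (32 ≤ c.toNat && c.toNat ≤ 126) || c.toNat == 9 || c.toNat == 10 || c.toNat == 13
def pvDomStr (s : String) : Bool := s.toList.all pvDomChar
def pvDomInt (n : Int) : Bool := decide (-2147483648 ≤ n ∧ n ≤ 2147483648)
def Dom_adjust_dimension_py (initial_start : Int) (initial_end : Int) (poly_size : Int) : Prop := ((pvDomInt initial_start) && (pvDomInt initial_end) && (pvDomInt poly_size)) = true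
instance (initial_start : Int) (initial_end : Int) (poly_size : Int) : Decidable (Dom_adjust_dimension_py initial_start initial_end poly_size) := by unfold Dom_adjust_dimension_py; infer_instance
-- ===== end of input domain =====

-- B replaces A's increment-until-divisible while loop with one closed-form modular
-- expression for the padding (objective: simpler; asymptotically O(1) vs O(|poly_size|)).

-- ===== PORT A =====
-- arithmetic fact used by the loop's termination measure (cited in decreasing_by)
theorem pv_emod_sub_one {a q : Int} (hq : 0 < q) (h : a % q ≠ 0) : (a - 1) % q = a % q - 1 := by
  have h1 : 0 ≤ a % q := Int.emod_nonneg _ (by omega)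
  have h2 : a % q < q := Int.emod_lt_of_pos _ hq
  have hq1 : 1 < q := by
    by_contra hc
    have hq1 : q = 1 := by omega
    exact h (by rw [hq1, Int.emod_one])
  calc (a - 1) % q = (a % q - 1 % q) % q := by rw [Int.sub_emod]
    _ = (a % q - 1) % q := by rw [Int.emod_eq_of_lt (by omega) hq1]
    _ = a % q - 1 := Int.emod_eq_of_lt (by omega) (by omega)

-- the 'while new_size % poly_size != 0: new_size += 1' loop; the 'poly_size = 0' guard
-- only makes the recursion total (Python raises ZeroDivisionError there, excluded by Pre_)
def pvLoopA (poly_size : Int) (new_size : Int) : Int :=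
  if hp : poly_size = 0 then new_size
  else if h : PySem.Int.mod new_size poly_size = 0 then new_size
  else pvLoopA poly_size (new_size + 1)
termination_by ((-new_size) % ((Int.natAbs poly_size : Int))).toNat
decreasing_by
  have hq : (0:Int) < (Int.natAbs poly_size : Int) := by
    have := Int.natAbs_pos.mpr hp; exact_mod_cast this
  have hdvd : ¬ ((Int.natAbs poly_size : Int) ∣ new_size) := by
    intro hd
    exact h ((PySem.Int.mod_eq_zero_iff_dvd new_size poly_size).mpr
      ((Int.natAbs_dvd).mp hd))
  have hm : (-new_size) % ((Int.natAbs poly_size : Int)) ≠ 0 := by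
    intro h0
    exact hdvd (Int.dvd_neg.mp (Int.dvd_of_emod_eq_zero h0))
  have h1 : 0 ≤ (-new_size) % ((Int.natAbs poly_size : Int)) := Int.emod_nonneg _ (by omega)
  have h3 : (-(new_size + 1)) % ((Int.natAbs poly_size : Int))
      = (-new_size) % ((Int.natAbs poly_size : Int)) - 1 := by
    have : -(new_size + 1) = -new_size - 1 := by ring
    rw [this]
    exact pv_emod_sub_one hq hm
  omega

def adjust_dimension_py (initial_start : Int) (initial_end : Int) (poly_size : Int) : Int × Int :=
  let new_start := initial_start
  let new_end := initial_end
  let initial_size := initial_end - initial_start + 1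
  let new_size := pvLoopA poly_size (initial_end - initial_start + 1)
  let add_size := new_size - initial_size
  (new_start - PySem.Int.floordiv add_size 2,
   new_end + (PySem.Int.floordiv add_size 2 + PySem.Int.mod add_size 2))

-- ===== PORT B =====
def adjust_dimension_py_alt (initial_start : Int) (initial_end : Int) (poly_size : Int) : Int × Int :=
  let add_size := PySem.Int.mod (initial_start - initial_end - 1) ((Int.natAbs poly_size : Int))
  let half := PySem.Int.floordiv add_size 2
  (initial_start - half, initial_end + add_size - half)

-- ===== PRECONDITION & SPEC =====
-- Python A raises ZeroDivisionError when poly_size = 0 (so does B); excluded here.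
def Pre_adjust_dimension_py (initial_start : Int) (initial_end : Int) (poly_size : Int) : Prop :=
  poly_size ≠ 0
instance (initial_start : Int) (initial_end : Int) (poly_size : Int) : Decidable (Pre_adjust_dimension_py initial_start initial_end poly_size) := by unfold Pre_adjust_dimension_py; infer_instance
def pvWitness_adjust_dimension_py : Int × Int × Int := (0, 4, 3)

def Spec_adjust_dimension_py (initial_start : Int) (initial_end : Int) (poly_size : Int) (out : Int × Int) : Prop := out = adjust_dimension_py_alt initial_start initial_end poly_size
instance (initial_start : Int) (initial_end : Int) (poly_size : Int) (out : Int × Int) : Decidable (Spec_adjust_dimension_py initial_start initial_end poly_size out) := by unfold Spec_adjust_dimension_py; infer_instance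

-- ===== CLAIM (what is proved, stated in full; the proofs are below) =====
def Claim_equal_adjust_dimension_py : Prop := ∀ (initial_start : Int) (initial_end : Int) (poly_size : Int), Dom_adjust_dimension_py initial_start initial_end poly_size → Pre_adjust_dimension_py initial_start initial_end poly_size → Spec_adjust_dimension_py initial_start initial_end poly_size (adjust_dimension_py initial_start initial_end poly_size)

-- ===== LEMMAS AND PROOFS =====
-- the loop computes n plus the distance to the next multiple of |p|
theorem pvLoopA_eq (p : Int) (hp : p ≠ 0) (n : Int) :
    pvLoopA p n = n + (-n) % ((Int.natAbs p : Int)) := by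
  have hq : (0:Int) < (Int.natAbs p : Int) := by
    have := Int.natAbs_pos.mpr hp; exact_mod_cast this
  generalize hk : ((-n) % ((Int.natAbs p : Int))).toNat = k
  induction k generalizing n with
  | zero =>
    have h1 : 0 ≤ (-n) % ((Int.natAbs p : Int)) := Int.emod_nonneg _ (by omega)
    have h0 : (-n) % ((Int.natAbs p : Int)) = 0 := by omega
    have hmod : PySem.Int.mod n p = 0 := by
      refine (PySem.Int.mod_eq_zero_iff_dvd n p).mpr ?_
      exact (Int.natAbs_dvd).mp (Int.dvd_neg.mp (Int.dvd_of_emod_eq_zero h0))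
    rw [pvLoopA, dif_neg hp, dif_pos hmod, h0, add_zero]
  | succ k ih =>
    have hm : (-n) % ((Int.natAbs p : Int)) ≠ 0 := by omega
    have hmod : PySem.Int.mod n p ≠ 0 := by
      intro h0
      exact hm (Int.emod_eq_zero_of_dvd (Int.dvd_neg.mpr
        ((Int.natAbs_dvd).mpr ((PySem.Int.mod_eq_zero_iff_dvd n p).mp h0))))
    have hstep : (-(n + 1)) % ((Int.natAbs p : Int))
        = (-n) % ((Int.natAbs p : Int)) - 1 := by
      have he : -(n + 1) = -n - 1 := by ring
      rw [he]; exact pv_emod_sub_one hq hm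
    have h1 : 0 ≤ (-n) % ((Int.natAbs p : Int)) := Int.emod_nonneg _ (by omega)
    rw [pvLoopA, dif_neg hp, dif_neg hmod, ih (n + 1) (by omega)]
    omega

-- ===== VERDICT (by name: the statement is the Claim_ definition above) =====
theorem adjust_dimension_py_spec : Claim_equal_adjust_dimension_py := by
  intro s e p _ hp
  have hq : (0:Int) < (Int.natAbs p : Int) := by
    have := Int.natAbs_pos.mpr hp; exact_mod_cast this
  unfold Spec_adjust_dimension_py adjust_dimension_py adjust_dimension_py_alt
  simp only [pvLoopA_eq p hp]
  have hneg : -(e - s + 1) = s - e - 1 := by ring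
  have hmodq : PySem.Int.mod (s - e - 1) ((Int.natAbs p : Int))
      = (s - e - 1) % ((Int.natAbs p : Int)) := PySem.Int.mod_eq_emod_of_pos hq
  set m : Int := (s - e - 1) % ((Int.natAbs p : Int)) with hm
  have hid : PySem.Int.floordiv m 2 * 2 + PySem.Int.mod m 2 = m :=
    PySem.Int.floordiv_mul_add_mod m 2
  have hadd : e - s + 1 + -(e - s + 1) % ((Int.natAbs p : Int)) - (e - s + 1) = m := by
    rw [hneg, ← hm]; ring
  rw [hadd, hmodq]
  refine Prod.ext rfl ?_
  simp only
  omega
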